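-- pv_equiv track=rewrite | github.com/clouden90/ScheduleCheck | src/schedulecheck/meetinglib.py | conflicts_check2
-- ===== SOURCE A (Python) =====
-- def conflicts_check2(data_):
--     n = len(data_)
--     conflicts = []
--     # Create an empty Interval Search Tree,
--     # add first appointment
--     root = None
--     root = insert(root, data_[0])
--
--     # Process rest of the intervals
--     for i in range(1, n):
--
--         # If current appointment conflicts
--         # with any of the existing intervals,
--         # append the pair
--         p2 = overlapsearch(root, data_[i])
--
--         if (p2 is not None):
--             conflicts.append((data_[i], p2))
--
--         # Insert this appointment
--         root = insert(root, data_[i])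
--     return conflicts
--
-- class ITNode:
--     def __init__(self):
--         self.max = None
--         self.i = None
--         self.left = None
--         self.right = None
--
-- def newNode(j):
--     temp = ITNode()
--     temp.i = j
--     temp.max = j[1]
--     return temp
--
-- def overlap(i1, i2):
--     if (i1[0] < i2[1] and i2[0] < i1[1]):
--         return True
--     return False
--
-- def overlapsearch(root, i):
--     # Base Case, tree is empty
--     if (root is None):
--         return None
--     # If given interval overlaps with root
--     if (overlap(root.i, i)):
--         return root.i
--     # If left child of root is present and
--     # max of left child is greater than or
--     # equal to given interval, then it may
--     # overlap with a left subtree interval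
--     if (root.left is not None and root.left.max >= i[0]):
--         return overlapsearch(root.left, i)
--     # Else interval can only overlap
--     # with right subtree
--     return overlapsearch(root.right, i)
--
-- def insert(node, data_):
--     # If the tree is empty, return a new node
--     root = node
--
--     if (node is None):
--         return newNode(data_)
--     # If key is smaller than root's key, go to left
--     # subtree and set successor as current node
--     if (data_[0] < node.i[0]):
--         root.left = insert(node.left, data_)
--     # Go to right subtree
--     else:
--         root.right = insert(node.right, data_)
--     if root.max < data_[1]:
--         root.max = data_[1]
--     return root
-- ===== SOURCE B (Python) =====
-- def conflicts_check2(data_):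
--     # Flat array-encoded interval tree: each node is [interval, max, left, right]
--     # with child links as list indices (None = no child); insert and search are
--     # iterative loops instead of A's recursive pointer tree.
--     first = data_[0]
--     nodes = [[first, first[1], None, None]]
--     conflicts = []
--     for iv in data_[1:]:
--         # iterative overlap search from the root (index 0)
--         j = 0
--         found = None
--         while j is not None:
--             node = nodes[j]
--             ni = node[0]
--             if ni[0] < iv[1] and iv[0] < ni[1]:
--                 found = ni
--                 break
--             if node[2] is not None and nodes[node[2]][1] >= iv[0]:
--                 j = node[2]
--             else:
--                 j = node[3]
--         if found is not None:
--             conflicts.append((iv, found))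
--         # iterative insert: append the new node, then descend from the root
--         # updating max along the path and attach at the first empty child
--         nodes.append([iv, iv[1], None, None])
--         new = len(nodes) - 1
--         j = 0
--         while True:
--             node = nodes[j]
--             if node[1] < iv[1]:
--                 node[1] = iv[1]
--             if iv[0] < node[0][0]:
--                 if node[2] is None:
--                     node[2] = new
--                     break
--                 j = node[2]
--             else:
--                 if node[3] is None:
--                     node[3] = new
--                     break
--                 j = node[3]
--     return conflicts
-- ===== Notes on version B (the rewrite author's own statement) =====
-- stated objective: alternative
-- what changed: Replaces the recursive pointer-based interval tree (ITNode objects, recursive insert/overlapsearch) with a flat array-encoded tree (list of [interval,max,left,right] records with index links) whose insert and search are iterative while-loops.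
import Mathlib
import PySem

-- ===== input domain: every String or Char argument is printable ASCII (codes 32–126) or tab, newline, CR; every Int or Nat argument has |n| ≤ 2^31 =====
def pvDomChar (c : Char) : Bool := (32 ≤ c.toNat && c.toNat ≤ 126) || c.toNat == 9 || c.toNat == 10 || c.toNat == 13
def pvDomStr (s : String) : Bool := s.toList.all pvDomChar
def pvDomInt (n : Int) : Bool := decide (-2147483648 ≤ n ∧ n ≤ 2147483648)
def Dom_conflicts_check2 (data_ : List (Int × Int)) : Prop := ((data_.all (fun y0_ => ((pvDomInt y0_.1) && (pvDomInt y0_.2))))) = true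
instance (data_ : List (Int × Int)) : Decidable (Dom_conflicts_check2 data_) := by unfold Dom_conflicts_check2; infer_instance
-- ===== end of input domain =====

-- B replaces A's recursive pointer-based interval tree with a flat array-encoded
-- tree (index links) whose insert and search are iterative fuelled loops;
-- objective: alternative (same asymptotic cost, different data structure).

-- ===== PORT A =====
-- A's ITNode pointer tree: i, max, left, right (None = nil)
inductive ATree where
  | nil : ATree
  | node : (Int × Int) → Int → ATree → ATree → ATree
deriving DecidableEq, Repr

-- def overlap(i1, i2)
def overlapA (i1 i2 : Int × Int) : Bool := decide (i1.1 < i2.2) && decide (i2.1 < i1.2)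

-- def overlapsearch(root, i)
def overlapsearchA : ATree → (Int × Int) → Option (Int × Int)
  | .nil, _ => none
  | .node iv _ l r, i =>
    if overlapA iv i then some iv
    else if (match l with | .node _ lmx _ _ => decide (lmx ≥ i.1) | .nil => false) then
      overlapsearchA l i
    else
      overlapsearchA r i

-- def insert(node, data_) — max is updated on every node of the descent path
def insertA : ATree → (Int × Int) → ATree
  | .nil, d => .node d d.2 .nil .nil
  | .node iv mx l r, d =>
    if d.1 < iv.1 then .node iv (if mx < d.2 then d.2 else mx) (insertA l d) r
    else .node iv (if mx < d.2 then d.2 else mx) l (insertA r d)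

def conflicts_check2 (data_ : List (Int × Int)) : List ((Int × Int) × (Int × Int)) :=
  match data_ with
  | [] => []   -- A raises IndexError on data_[0]; excluded by Pre_
  | d0 :: rest =>
    (rest.foldl (fun (st : ATree × List ((Int × Int) × (Int × Int))) d =>
      let p2 := overlapsearchA st.1 d
      let cs := match p2 with | some p => st.2 ++ [(d, p)] | none => st.2
      (insertA st.1 d, cs)) (insertA .nil d0, [])).2

-- ===== PORT B =====
-- B's flat node record: [interval, max, left index, right index]
structure BNode where
  iv : Int × Int
  mx : Int
  l : Option Nat
  r : Option Nat
deriving DecidableEq, Repr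

def dummyB : BNode := ⟨(0, 0), 0, none, none⟩

-- B's iterative `while j is not None` search loop; fuel = number of nodes
-- (a totality guard only: the descent visits distinct nodes)
def searchB (nodes : List BNode) (iv : Int × Int) : Nat → Nat → Option (Int × Int)
  | _, 0 => none
  | j, fuel + 1 =>
    let n := nodes.getD j dummyB
    if n.iv.1 < iv.2 ∧ iv.1 < n.iv.2 then some n.iv
    else
      let next : Option Nat :=
        match n.l with
        | some lj => if (nodes.getD lj dummyB).mx ≥ iv.1 then some lj else n.r
        | none => n.r
      match next with
      | some j' => searchB nodes iv j' fuel
      | none => none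

-- B's iterative insert descent: update max along the path, attach at first empty child
def insertLoopB (iv : Int × Int) (newIdx : Nat) : List BNode → Nat → Nat → List BNode
  | nodes, _, 0 => nodes
  | nodes, j, fuel + 1 =>
    let n := nodes.getD j dummyB
    let mx' := if n.mx < iv.2 then iv.2 else n.mx
    if iv.1 < n.iv.1 then
      match n.l with
      | none => nodes.set j ⟨n.iv, mx', some newIdx, n.r⟩
      | some lj => insertLoopB iv newIdx (nodes.set j ⟨n.iv, mx', n.l, n.r⟩) lj fuel
    else
      match n.r with
      | none => nodes.set j ⟨n.iv, mx', n.l, some newIdx⟩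
      | some rj => insertLoopB iv newIdx (nodes.set j ⟨n.iv, mx', n.l, n.r⟩) rj fuel

-- append the new node, then descend from the root (index 0)
def insertB (nodes : List BNode) (iv : Int × Int) : List BNode :=
  let nodes' := nodes ++ [⟨iv, iv.2, none, none⟩]
  insertLoopB iv nodes.length nodes' 0 nodes'.length

def conflicts_check2_alt (data_ : List (Int × Int)) : List ((Int × Int) × (Int × Int)) :=
  match data_ with
  | [] => []   -- B also raises IndexError on data_[0]; excluded by Pre_
  | d0 :: rest =>
    (rest.foldl (fun (st : List BNode × List ((Int × Int) × (Int × Int))) d =>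
      let found := searchB st.1 d 0 st.1.length
      let cs := match found with | some p => st.2 ++ [(d, p)] | none => st.2
      (insertB st.1 d, cs)) ([⟨d0, d0.2, none, none⟩], [])).2

-- ===== PRECONDITION & SPEC =====
-- Pre_ excludes only the empty list, on which both A and B raise IndexError at data_[0].
def Pre_conflicts_check2 (data_ : List (Int × Int)) : Prop := data_ ≠ []
instance (data_ : List (Int × Int)) : Decidable (Pre_conflicts_check2 data_) := by
  unfold Pre_conflicts_check2; infer_instance

def pvWitness_conflicts_check2 : (List (Int × Int)) := ([(0, 2), (1, 3)])

def Spec_conflicts_check2 (data_ : List (Int × Int)) (out : List ((Int × Int) × (Int × Int))) : Prop := out = conflicts_check2_alt data_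
instance (data_ : List (Int × Int)) (out : List ((Int × Int) × (Int × Int))) : Decidable (Spec_conflicts_check2 data_ out) := by unfold Spec_conflicts_check2; infer_instance

-- ===== CLAIM (what is proved, stated in full; the proofs are below) =====
def Claim_equal_conflicts_check2 : Prop := ∀ (data_ : List (Int × Int)), Dom_conflicts_check2 data_ → Pre_conflicts_check2 data_ → Spec_conflicts_check2 data_ (conflicts_check2 data_)

-- ===== LEMMAS AND PROOFS =====

-- `TRep nodes oj S t`: index `oj` of B's flat array encodes A's tree `t`, using
-- exactly the (distinct, descent-increasing) index support `S`.
inductive TRep (nodes : List BNode) : Option Nat → List Nat → ATree → Prop where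
  | nil : TRep nodes none [] .nil
  | node {j : Nat} {iv : Int × Int} {mx : Int} {ol orr : Option Nat}
      {S1 S2 : List Nat} {t1 t2 : ATree} :
      nodes.getD j dummyB = ⟨iv, mx, ol, orr⟩ →
      j < nodes.length →
      TRep nodes ol S1 t1 → TRep nodes orr S2 t2 →
      (∀ k ∈ S1, j < k) → (∀ k ∈ S2, j < k) →
      (∀ k, k ∈ S1 → k ∉ S2) →
      TRep nodes (some j) (j :: (S1 ++ S2)) (.node iv mx t1 t2)

theorem getD_set_self (l : List BNode) (j : Nat) (a : BNode) (h : j < l.length) :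
    (l.set j a).getD j dummyB = a := by simp [List.getD, h]

theorem getD_set_ne (l : List BNode) {j k : Nat} (a : BNode) (h : j ≠ k) :
    (l.set j a).getD k dummyB = l.getD k dummyB := by
  simp [List.getD, List.getElem?_set_ne h]

theorem getD_append_self (l : List BNode) (a : BNode) :
    (l ++ [a]).getD l.length dummyB = a := by simp [List.getD]

theorem trep_lt {nodes : List BNode} {oj : Option Nat} {S : List Nat} {t : ATree}
    (h : TRep nodes oj S t) : ∀ k ∈ S, k < nodes.length := by
  induction h with
  | nil => simp
  | node hget hlt h1 h2 ho1 ho2 hd ih1 ih2 =>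
    intro k hk
    rcases List.mem_cons.1 hk with rfl | hk
    · exact hlt
    · rcases List.mem_append.1 hk with hk | hk
      · exact ih1 k hk
      · exact ih2 k hk

theorem trep_nodup {nodes : List BNode} {oj : Option Nat} {S : List Nat} {t : ATree}
    (h : TRep nodes oj S t) : S.Nodup := by
  induction h with
  | nil => simp
  | node hget hlt h1 h2 ho1 ho2 hd ih1 ih2 =>
    refine List.nodup_cons.2 ⟨?_, List.Nodup.append ih1 ih2 (List.disjoint_left.2 hd)⟩
    intro hj
    rcases List.mem_append.1 hj with hj | hj
    · exact absurd (ho1 _ hj) (lt_irrefl _)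
    · exact absurd (ho2 _ hj) (lt_irrefl _)

theorem trep_len_le {nodes : List BNode} {oj : Option Nat} {S : List Nat} {t : ATree}
    (h : TRep nodes oj S t) : S.length ≤ nodes.length := by
  calc S.length = S.toFinset.card := (List.toFinset_card_of_nodup (trep_nodup h)).symm
    _ ≤ (Finset.range nodes.length).card := by
        refine Finset.card_le_card ?_
        intro x hx
        simp only [List.mem_toFinset] at hx
        simpa using trep_lt h x hx
    _ = nodes.length := Finset.card_range _

theorem trep_frame {nodes nodes' : List BNode} {oj : Option Nat} {S : List Nat} {t : ATree}
    (h : TRep nodes oj S t)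
    (hag : ∀ k ∈ S, nodes'.getD k dummyB = nodes.getD k dummyB)
    (hlen : nodes.length ≤ nodes'.length) : TRep nodes' oj S t := by
  induction h with
  | nil => exact .nil
  | node hget hlt h1 h2 ho1 ho2 hd ih1 ih2 =>
    refine TRep.node ?_ (lt_of_lt_of_le hlt hlen) (ih1 ?_) (ih2 ?_) ho1 ho2 hd
    · rw [hag _ (List.mem_cons_self), hget]
    · intro k hk; exact hag _ (List.mem_cons_of_mem _ (List.mem_append_left _ hk))
    · intro k hk; exact hag _ (List.mem_cons_of_mem _ (List.mem_append_right _ hk))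

-- proof-side wrapper: search from an optional index
def searchBO (nodes : List BNode) (iv : Int × Int) (oj : Option Nat) (fuel : Nat) : Option (Int × Int) :=
  match oj with
  | some j => searchB nodes iv j fuel
  | none => none

-- search agrees with A's overlapsearch on a represented tree
theorem trep_search {nodes : List BNode} {oj : Option Nat} {S : List Nat} {t : ATree}
    (h : TRep nodes oj S t) (iv : Int × Int) :
    ∀ fuel, S.length ≤ fuel → searchBO nodes iv oj fuel = overlapsearchA t iv := by
  induction h with
  | nil => intro fuel _; rfl
  | @node j iv0 mx ol orr S1 S2 t1 t2 hget hlt h1 h2 ho1 ho2 hd ih1 ih2 =>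
    intro fuel hfuel
    match fuel, hfuel with
    | f + 1, hfuel =>
      have hf1 : S1.length ≤ f := by simp at hfuel; omega
      have hf2 : S2.length ≤ f := by simp at hfuel; omega
      show searchB nodes iv j (f + 1) = overlapsearchA (.node iv0 mx t1 t2) iv
      simp only [searchB, hget]
      by_cases hc : iv0.1 < iv.2 ∧ iv.1 < iv0.2
      · simp [overlapsearchA, overlapA, hc.1, hc.2]
      · rw [if_neg hc]
        have hcA : overlapA iv0 iv = false := by
          simp only [overlapA]
          rcases not_and_or.1 hc with hc' | hc' <;> simp [hc']
        cases h1 with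
        | nil =>
          simp only [overlapsearchA, hcA, Bool.false_eq_true, if_false]
          exact ih2 f hf2
        | @node lj iv1 mx1 ol1 orr1 S11 S12 t11 t12 hget1 hlt1 h11 h12 ho11 ho12 hd1 =>
          simp only [overlapsearchA, hcA, Bool.false_eq_true, if_false, hget1]
          by_cases hg : mx1 ≥ iv.1
          · simpa [hg] using ih1 f hf1
          · simpa [hg] using ih2 f hf2

-- B's iterative insert descent realises A's recursive insert
theorem trep_insertLoop {t : ATree} : ∀ {nodes : List BNode} {j : Nat} {S : List Nat},
    TRep nodes (some j) S t →
    ∀ (iv : Int × Int) (newIdx : Nat),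
    nodes.getD newIdx dummyB = ⟨iv, iv.2, none, none⟩ →
    newIdx < nodes.length →
    (∀ k ∈ S, k < newIdx) →
    ∀ fuel, S.length ≤ fuel →
    ∃ S', TRep (insertLoopB iv newIdx nodes j fuel) (some j) S' (insertA t iv) ∧
      S'.Perm (newIdx :: S) ∧
      (insertLoopB iv newIdx nodes j fuel).length = nodes.length ∧
      (∀ k, k ∉ S' → (insertLoopB iv newIdx nodes j fuel).getD k dummyB = nodes.getD k dummyB) := by
  induction t with
  | nil => intro nodes j S h; cases h
  | node iv0 mx0 t1 t2 ih1 ih2 =>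
    intro nodes j S h iv newIdx hnew hnewlt hbig fuel hfuel
    cases h with
    | @node _ _ _ ol orr S1 S2 _ _ hget hlt h1 h2 ho1 ho2 hd =>
      have hjnew : j < newIdx := hbig j List.mem_cons_self
      match fuel, hfuel with
      | f + 1, hfuel =>
        have hf1 : S1.length ≤ f := by simp at hfuel; omega
        have hf2 : S2.length ≤ f := by simp at hfuel; omega
        by_cases hdir : iv.1 < iv0.1
        · cases ol with
          | none =>
            cases h1
            simp only [insertLoopB, hget, hdir, if_true]
            refine ⟨j :: ([newIdx] ++ S2), ?_, ?_, List.length_set .., ?_⟩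
            · have hA : insertA (.node iv0 mx0 .nil t2) iv
                  = .node iv0 (if mx0 < iv.2 then iv.2 else mx0) (.node iv iv.2 .nil .nil) t2 := by
                simp [insertA, hdir]
              rw [hA]
              refine TRep.node (ol := some newIdx) (orr := orr) (S1 := [newIdx]) (S2 := S2)
                (getD_set_self _ _ _ hlt) (by simpa using hlt) ?_ ?_ ?_ ?_ ?_
              · have hg : (nodes.set j ⟨iv0, if mx0 < iv.2 then iv.2 else mx0, some newIdx, orr⟩).getD newIdx dummyB
                    = ⟨iv, iv.2, none, none⟩ := by
                  rw [getD_set_ne _ _ (Nat.ne_of_lt hjnew), hnew]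
                exact TRep.node hg (by simpa using hnewlt) .nil .nil (by simp) (by simp) (by simp)
              · refine trep_frame h2 ?_ (by simp)
                intro k hk
                exact getD_set_ne _ _ (Nat.ne_of_lt (ho2 k hk))
              · intro k hk; simp at hk; omega
              · exact ho2
              · intro k hk hk2
                simp at hk
                exact absurd (hbig k (by simp [hk2])) (by omega)
            · simpa using (List.Perm.swap newIdx j S2)
            · intro k hk
              have hkj : k ≠ j := by simp at hk; tauto
              exact getD_set_ne _ _ (Ne.symm hkj)
          | some lj =>
            simp only [insertLoopB, hget, hdir, if_true]
            set mx' := if mx0 < iv.2 then iv.2 else mx0 with hmx'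
            set nodes1 := nodes.set j ⟨iv0, mx', some lj, orr⟩ with hnodes1
            have hag1 : ∀ k ∈ S1, nodes1.getD k dummyB = nodes.getD k dummyB := by
              intro k hk
              exact getD_set_ne _ _ (Nat.ne_of_lt (ho1 k hk))
            have h1' : TRep nodes1 (some lj) S1 t1 := trep_frame h1 hag1 (by simp [hnodes1])
            have hnew1 : nodes1.getD newIdx dummyB = ⟨iv, iv.2, none, none⟩ := by
              rw [hnodes1, getD_set_ne _ _ (Nat.ne_of_lt hjnew), hnew]
            obtain ⟨S1', hrep1, hperm1, hlen1, hfr1⟩ :=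
              ih1 h1' iv newIdx hnew1 (by simp [hnodes1]; omega)
                (fun k hk => hbig k (List.mem_cons_of_mem _ (List.mem_append_left _ hk))) f hf1
            have hmemS1' : ∀ k, k ∈ S1' ↔ (k = newIdx ∨ k ∈ S1) := by
              intro k; rw [hperm1.mem_iff]; simp
            have hjS1' : j ∉ S1' := by
              rw [hmemS1']
              rintro (rfl | hk)
              · omega
              · exact absurd (ho1 j hk) (lt_irrefl j)
            have hnewS2 : newIdx ∉ S2 := fun hk =>
              absurd (hbig newIdx (List.mem_cons_of_mem _ (List.mem_append_right _ hk))) (lt_irrefl _)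
            refine ⟨j :: (S1' ++ S2), ?_, ?_, ?_, ?_⟩
            · have hA : insertA (.node iv0 mx0 t1 t2) iv = .node iv0 mx' (insertA t1 iv) t2 := by
                simp [insertA, hdir, hmx']
              rw [hA]
              refine TRep.node (ol := some lj) (orr := orr) (S1 := S1') (S2 := S2) ?_ ?_ hrep1 ?_ ?_ ho2 ?_
              · rw [hfr1 j hjS1', hnodes1, getD_set_self _ _ _ hlt]
              · rw [hlen1]; simpa [hnodes1] using hlt
              · refine trep_frame h2 ?_ (by rw [hlen1]; simp [hnodes1])
                intro k hk
                have hkS1' : k ∉ S1' := by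
                  rw [hmemS1']
                  rintro (rfl | hk1)
                  · exact hnewS2 hk
                  · exact hd k hk1 hk
                rw [hfr1 k hkS1', hnodes1, getD_set_ne _ _ (Nat.ne_of_lt (ho2 k hk))]
              · intro k hk
                rcases (hmemS1' k).1 hk with rfl | hk1
                · exact hjnew
                · exact ho1 k hk1
              · intro k hk hk2
                rcases (hmemS1' k).1 hk with rfl | hk1
                · exact hnewS2 hk2
                · exact hd k hk1 hk2
            · exact List.Perm.trans (List.Perm.cons j (hperm1.append_right S2))
                (List.Perm.swap newIdx j _)
            · rw [hlen1]; simp [hnodes1]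
            · intro k hk
              have hkj : k ≠ j := fun h => hk (h ▸ List.mem_cons_self)
              have hkS1' : k ∉ S1' := fun h =>
                hk (List.mem_cons_of_mem _ (List.mem_append_left _ h))
              rw [hfr1 k hkS1', hnodes1, getD_set_ne _ _ (Ne.symm hkj)]
        · cases orr with
          | none =>
            cases h2
            simp only [insertLoopB, hget, hdir, if_false]
            refine ⟨j :: (S1 ++ [newIdx]), ?_, ?_, List.length_set .., ?_⟩
            · have hA : insertA (.node iv0 mx0 t1 .nil) iv
                  = .node iv0 (if mx0 < iv.2 then iv.2 else mx0) t1 (.node iv iv.2 .nil .nil) := by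
                simp [insertA, hdir]
              rw [hA]
              refine TRep.node (ol := ol) (orr := some newIdx) (S1 := S1) (S2 := [newIdx])
                (getD_set_self _ _ _ hlt) (by simpa using hlt) ?_ ?_ ho1 ?_ ?_
              · refine trep_frame h1 ?_ (by simp)
                intro k hk
                exact getD_set_ne _ _ (Nat.ne_of_lt (ho1 k hk))
              · have hg : (nodes.set j ⟨iv0, if mx0 < iv.2 then iv.2 else mx0, ol, some newIdx⟩).getD newIdx dummyB
                    = ⟨iv, iv.2, none, none⟩ := by
                  rw [getD_set_ne _ _ (Nat.ne_of_lt hjnew), hnew]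
                exact TRep.node hg (by simpa using hnewlt) .nil .nil (by simp) (by simp) (by simp)
              · intro k hk; simp at hk; omega
              · intro k hk hk2
                simp at hk2
                subst hk2
                exact absurd (hbig k (by simp [hk])) (by omega)
            · exact List.Perm.trans (List.Perm.cons j List.perm_middle)
                (List.Perm.swap newIdx j _)
            · intro k hk
              have hkj : k ≠ j := by simp at hk; tauto
              exact getD_set_ne _ _ (Ne.symm hkj)
          | some rj =>
            simp only [insertLoopB, hget, hdir, if_false]
            set mx' := if mx0 < iv.2 then iv.2 else mx0 with hmx'
            set nodes1 := nodes.set j ⟨iv0, mx', ol, some rj⟩ with hnodes1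
            have hag2 : ∀ k ∈ S2, nodes1.getD k dummyB = nodes.getD k dummyB := by
              intro k hk
              exact getD_set_ne _ _ (Nat.ne_of_lt (ho2 k hk))
            have h2' : TRep nodes1 (some rj) S2 t2 := trep_frame h2 hag2 (by simp [hnodes1])
            have hnew1 : nodes1.getD newIdx dummyB = ⟨iv, iv.2, none, none⟩ := by
              rw [hnodes1, getD_set_ne _ _ (Nat.ne_of_lt hjnew), hnew]
            obtain ⟨S2', hrep2, hperm2, hlen2, hfr2⟩ :=
              ih2 h2' iv newIdx hnew1 (by simp [hnodes1]; omega)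
                (fun k hk => hbig k (List.mem_cons_of_mem _ (List.mem_append_right _ hk))) f hf2
            have hmemS2' : ∀ k, k ∈ S2' ↔ (k = newIdx ∨ k ∈ S2) := by
              intro k; rw [hperm2.mem_iff]; simp
            have hjS2' : j ∉ S2' := by
              rw [hmemS2']
              rintro (rfl | hk)
              · omega
              · exact absurd (ho2 j hk) (lt_irrefl j)
            have hnewS1 : newIdx ∉ S1 := fun hk =>
              absurd (hbig newIdx (List.mem_cons_of_mem _ (List.mem_append_left _ hk))) (lt_irrefl _)
            refine ⟨j :: (S1 ++ S2'), ?_, ?_, ?_, ?_⟩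
            · have hA : insertA (.node iv0 mx0 t1 t2) iv = .node iv0 mx' t1 (insertA t2 iv) := by
                simp [insertA, hdir, hmx']
              rw [hA]
              refine TRep.node (ol := ol) (orr := some rj) (S1 := S1) (S2 := S2') ?_ ?_ ?_ hrep2 ho1 ?_ ?_
              · rw [hfr2 j hjS2', hnodes1, getD_set_self _ _ _ hlt]
              · rw [hlen2]; simpa [hnodes1] using hlt
              · refine trep_frame h1 ?_ (by rw [hlen2]; simp [hnodes1])
                intro k hk
                have hkS2' : k ∉ S2' := by
                  rw [hmemS2']
                  rintro (rfl | hk2)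
                  · exact hnewS1 hk
                  · exact hd k hk hk2
                rw [hfr2 k hkS2', hnodes1, getD_set_ne _ _ (Nat.ne_of_lt (ho1 k hk))]
              · intro k hk
                rcases (hmemS2' k).1 hk with rfl | hk2
                · exact hjnew
                · exact ho2 k hk2
              · intro k hk hk2
                rcases (hmemS2' k).1 hk2 with rfl | hk1
                · exact hnewS1 hk
                · exact hd k hk hk1
            · exact List.Perm.trans (List.Perm.cons j (hperm2.append_left S1))
                (List.Perm.trans (List.Perm.cons j List.perm_middle)
                  (List.Perm.swap newIdx j _))
            · rw [hlen2]; simp [hnodes1]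
            · intro k hk
              have hkj : k ≠ j := fun h => hk (h ▸ List.mem_cons_self)
              have hkS2' : k ∉ S2' := fun h =>
                hk (List.mem_cons_of_mem _ (List.mem_append_right _ h))
              rw [hfr2 k hkS2', hnodes1, getD_set_ne _ _ (Ne.symm hkj)]

theorem trep_insertB {nodes : List BNode} {S : List Nat} {t : ATree}
    (h : TRep nodes (some 0) S t) (iv : Int × Int) :
    ∃ S', TRep (insertB nodes iv) (some 0) S' (insertA t iv) ∧
      (insertB nodes iv).length = nodes.length + 1 := by
  have hag : ∀ k ∈ S, (nodes ++ [(⟨iv, iv.2, none, none⟩ : BNode)]).getD k dummyB = nodes.getD k dummyB := by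
    intro k hk
    exact List.getD_append _ _ _ _ (trep_lt h k hk)
  have h' : TRep (nodes ++ [(⟨iv, iv.2, none, none⟩ : BNode)]) (some 0) S t :=
    trep_frame h hag (by simp)
  have hnew : (nodes ++ [(⟨iv, iv.2, none, none⟩ : BNode)]).getD nodes.length dummyB
      = ⟨iv, iv.2, none, none⟩ := getD_append_self nodes _
  obtain ⟨S', hrep, _, hlen, _⟩ :=
    trep_insertLoop h' iv nodes.length hnew (by simp)
      (fun k hk => trep_lt h k hk) (nodes ++ [(⟨iv, iv.2, none, none⟩ : BNode)]).length
      (le_trans (trep_len_le h) (by simp))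
  exact ⟨S', hrep, by simpa [insertB] using hlen⟩

theorem loop_eq : ∀ (rest : List (Int × Int)) (tree : ATree) (nodes : List BNode)
    (S : List Nat) (cs : List ((Int × Int) × (Int × Int))),
    TRep nodes (some 0) S tree →
    (rest.foldl (fun (st : List BNode × List ((Int × Int) × (Int × Int))) d =>
      let found := searchB st.1 d 0 st.1.length
      let cs := match found with | some p => st.2 ++ [(d, p)] | none => st.2
      (insertB st.1 d, cs)) (nodes, cs)).2
    = (rest.foldl (fun (st : ATree × List ((Int × Int) × (Int × Int))) d =>
      let p2 := overlapsearchA st.1 d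
      let cs := match p2 with | some p => st.2 ++ [(d, p)] | none => st.2
      (insertA st.1 d, cs)) (tree, cs)).2 := by
  intro rest
  induction rest with
  | nil => intro tree nodes S cs h; rfl
  | cons d rest ih =>
    intro tree nodes S cs h
    have hs : searchB nodes d 0 nodes.length = overlapsearchA tree d := by
      have := trep_search h d nodes.length (trep_len_le h)
      simpa [searchBO] using this
    obtain ⟨S', hrep, _⟩ := trep_insertB h d
    simp only [List.foldl_cons, hs]
    exact ih (insertA tree d) (insertB nodes d) S'
      (match overlapsearchA tree d with | some p => cs ++ [(d, p)] | none => cs) hrep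

-- ===== VERDICT (by name: the statement is the Claim_ definition above) =====
theorem conflicts_check2_spec : Claim_equal_conflicts_check2 := by
  intro data_ _hdom hpre
  unfold Spec_conflicts_check2
  match data_ with
  | [] => exact absurd rfl hpre
  | d0 :: rest =>
    show conflicts_check2 (d0 :: rest) = conflicts_check2_alt (d0 :: rest)
    unfold conflicts_check2 conflicts_check2_alt
    refine (loop_eq rest (insertA .nil d0) [⟨d0, d0.2, none, none⟩] [0] [] ?_).symm
    refine TRep.node (iv := d0) (mx := d0.2) (ol := none) (orr := none)
      (S1 := []) (S2 := []) (t1 := .nil) (t2 := .nil) rfl ?_ .nil .nil ?_ ?_ ?_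
    · simp
    · intro k hk; simp at hk
    · intro k hk; simp at hk
    · intro k hk; simp at hk
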